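-- pv_equiv track=rewrite | github.com/pypi-data/pypi-mirror-395 | packages/fm-prime/fm_prime-1.0.9-py3-none-any.whl/fm_prime/primeFractal.py | is_semi_prime
-- ===== SOURCE A (Python) =====
-- def is_semi_prime(n, pattern_type):
--     """
--     Determine if a given index n corresponds to a semi-prime based on the equations.
--     pattern_type: "6n+1" or "6n-1"
--     """
--     for k in range(1, n):  # Explore possible k values
--         for kk in range(1, n):  # Explore possible kk values
--             if pattern_type == "6n+1":
--                 if (6 * k + 1) * (6 * kk + 1) == 6 * n + 1:
--                     return True
--                 if (6 * k - 1) * (6 * kk - 1) == 6 * n + 1: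
--                     return True
--             elif pattern_type == "6n-1":
--                 if (6 * k - 1) * (6 * kk + 1) == 6 * n - 1:
--                     return True
--                 if (6 * k + 1) * (6 * kk - 1) == 6 * n - 1:
--                     return True
--     return False
-- ===== SOURCE B (Python) =====
-- def is_semi_prime(n, pattern_type):
--     """Trial-divide m = 6n+/-1 up to sqrt(m) and check the factor forms mod 6.
--
--     O(sqrt(n)) instead of A's O(n^2) double loop over k, kk.
--     """
--     if n < 2:
--         return False
--     if pattern_type == "6n+1":
--         m = 6 * n + 1
--     elif pattern_type == "6n-1":
--         m = 6 * n - 1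
--     else:
--         return False
--     d = 5
--     while d * d <= m:
--         if m % d == 0:
--             e = m // d
--             r, s = d % 6, e % 6
--             if pattern_type == "6n+1":
--                 if (r == 1 and s == 1) or (r == 5 and s == 5):
--                     return True
--             else:
--                 if (r == 1 and s == 5) or (r == 5 and s == 1):
--                     return True
--         d += 1
--     return False
-- ===== Notes on version B (the rewrite author's own statement) =====
-- stated objective: faster
-- what changed: Replaced A's O(n^2) double loop over all candidate pairs (k, kk) by trial division of m = 6n+/-1 up to sqrt(m), checking each divisor pair's residues mod 6.
import Mathlib
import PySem

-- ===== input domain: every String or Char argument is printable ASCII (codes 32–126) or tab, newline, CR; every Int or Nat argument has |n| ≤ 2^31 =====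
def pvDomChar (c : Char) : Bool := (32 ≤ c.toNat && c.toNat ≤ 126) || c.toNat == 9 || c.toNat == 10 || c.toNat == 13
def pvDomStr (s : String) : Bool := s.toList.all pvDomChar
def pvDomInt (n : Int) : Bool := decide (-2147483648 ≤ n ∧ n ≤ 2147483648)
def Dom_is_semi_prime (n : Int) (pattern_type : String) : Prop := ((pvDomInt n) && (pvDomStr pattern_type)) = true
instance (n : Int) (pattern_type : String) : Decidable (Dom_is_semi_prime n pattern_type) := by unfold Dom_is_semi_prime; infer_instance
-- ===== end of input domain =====

-- B replaces A's O(n^2) double loop by trial division of m = 6n±1 up to √m, checking each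
-- divisor pair's residues mod 6 (objective: faster).

-- ===== PORT A =====
def is_semi_prime (n : Int) (pattern_type : String) : Bool :=
  (PySem.List.pyRange 1 n 1).any fun k =>
    (PySem.List.pyRange 1 n 1).any fun kk =>
      if pattern_type == "6n+1" then
        ((6*k+1)*(6*kk+1) == 6*n+1) || ((6*k-1)*(6*kk-1) == 6*n+1)
      else if pattern_type == "6n-1" then
        ((6*k-1)*(6*kk+1) == 6*n-1) || ((6*k+1)*(6*kk-1) == 6*n-1)
      else false

-- ===== PORT B =====
-- the residue-form test on a divisor pair (r, s) = (d % 6, e % 6)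
def pvOk (plus : Bool) (r s : Int) : Bool :=
  if plus then (r == 1 && s == 1) || (r == 5 && s == 5)
  else (r == 1 && s == 5) || (r == 5 && s == 1)

-- the `while d * d <= m` trial-division loop of Source B
def pvTrial (m : Int) (plus : Bool) (d : Int) : Bool :=
  if h : d * d ≤ m then
    if PySem.Int.mod m d = 0 ∧
        pvOk plus (PySem.Int.mod d 6) (PySem.Int.mod (PySem.Int.floordiv m d) 6) = true then
      true
    else pvTrial m plus (d + 1)
  else false
termination_by (m + 1 - d).toNat
decreasing_by
  have hd : d ≤ d * d := by
    by_cases h0 : d ≤ 0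
    · nlinarith [mul_self_nonneg d]
    · nlinarith
  omega

def is_semi_prime_alt (n : Int) (pattern_type : String) : Bool :=
  if n < 2 then false
  else if pattern_type == "6n+1" then pvTrial (6*n+1) true 5
  else if pattern_type == "6n-1" then pvTrial (6*n-1) false 5
  else false

-- ===== PRECONDITION & SPEC =====
def Spec_is_semi_prime (n : Int) (pattern_type : String) (out : Bool) : Prop := out = is_semi_prime_alt n pattern_type
instance (n : Int) (pattern_type : String) (out : Bool) : Decidable (Spec_is_semi_prime n pattern_type out) := by unfold Spec_is_semi_prime; infer_instance

-- ===== CLAIM (what is proved, stated in full; the proofs are below) =====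
def Claim_equal_is_semi_prime : Prop := ∀ (n : Int) (pattern_type : String), Dom_is_semi_prime n pattern_type → Spec_is_semi_prime n pattern_type (is_semi_prime n pattern_type)

-- ===== LEMMAS AND PROOFS =====

-- the trial loop finds a divisor ≥ d (below √m) whose pair passes the residue test
lemma pvTrial_eq_true (m : Int) (plus : Bool) (d : Int) (hd : 0 ≤ d) :
    pvTrial m plus d = true ↔
      ∃ j : Int, d ≤ j ∧ j * j ≤ m ∧ PySem.Int.mod m j = 0 ∧
        pvOk plus (PySem.Int.mod j 6) (PySem.Int.mod (PySem.Int.floordiv m j) 6) = true := by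
  fun_induction pvTrial m plus d with
  | case1 d h hhit =>
    simp only [true_iff]
    exact ⟨d, le_refl d, h, hhit.1, hhit.2⟩
  | case2 d h hmiss ih =>
    rw [ih (by omega)]
    constructor
    · rintro ⟨j, hj, rest⟩; exact ⟨j, by omega, rest⟩
    · rintro ⟨j, hj, hjj, hm0, hok⟩
      refine ⟨j, ?_, hjj, hm0, hok⟩
      rcases eq_or_lt_of_le hj with rfl | hlt
      · exact absurd ⟨hm0, hok⟩ hmiss
      · omega
  | case3 d h =>
    constructor
    · intro hf; exact absurd hf (by simp)
    · rintro ⟨j, hj, hjj, -, -⟩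
      have : d * d ≤ j * j := by nlinarith [mul_nonneg (sub_nonneg.mpr hj) (by linarith : (0:ℤ) ≤ j + d)]
      omega

-- a factorization a * b = m with 0 < a ≤ b yields the divisor facts for a
lemma pair_to_div (a b m : Int) (ha : 0 < a) (hab : a ≤ b) (h : a * b = m) :
    a * a ≤ m ∧ m % a = 0 ∧ m / a = b := by
  refine ⟨by nlinarith, by rw [← h]; exact Int.mul_emod_right a b,
    by rw [← h]; exact Int.mul_ediv_cancel_left b (by omega)⟩

-- a divisor j of m with 5 ≤ j, j² ≤ m yields the cofactor e with j ≤ e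
lemma div_to_pair (m j : Int) (hj : 5 ≤ j) (hjj : j * j ≤ m) (hmod : m % j = 0) :
    ∃ e, m = j * e ∧ j ≤ e ∧ m / j = e := by
  obtain ⟨e, he⟩ := Int.dvd_of_emod_eq_zero hmod
  refine ⟨e, he, ?_, by rw [he]; exact Int.mul_ediv_cancel_left e (by omega)⟩
  have : j * j ≤ j * e := by rw [← he]; exact hjj
  exact le_of_mul_le_mul_left this (by omega)

lemma key_plus (n : Int) :
    (∃ k, (1 ≤ k ∧ k < n) ∧ ∃ kk, (1 ≤ kk ∧ kk < n) ∧
      ((6*k+1)*(6*kk+1) = 6*n+1 ∨ (6*k-1)*(6*kk-1) = 6*n+1))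
    ↔ (∃ j, 5 ≤ j ∧ j * j ≤ 6*n+1 ∧ (6*n+1) % j = 0 ∧
        ((j % 6 = 1 ∧ ((6*n+1)/j) % 6 = 1) ∨ (j % 6 = 5 ∧ ((6*n+1)/j) % 6 = 5))) := by
  constructor
  · rintro ⟨k, ⟨hk1, hk2⟩, kk, ⟨hkk1, hkk2⟩, h | h⟩
    · rcases le_total (6*k+1) (6*kk+1) with hab | hab
      · obtain ⟨h1, h2, h3⟩ := pair_to_div _ _ _ (by omega) hab h
        exact ⟨6*k+1, by omega, h1, h2, Or.inl ⟨by omega, by rw [h3]; omega⟩⟩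
      · obtain ⟨h1, h2, h3⟩ := pair_to_div (6*kk+1) (6*k+1) (6*n+1) (by omega) hab (by rw [mul_comm]; exact h)
        exact ⟨6*kk+1, by omega, h1, h2, Or.inl ⟨by omega, by rw [h3]; omega⟩⟩
    · rcases le_total (6*k-1) (6*kk-1) with hab | hab
      · obtain ⟨h1, h2, h3⟩ := pair_to_div _ _ _ (by omega) hab h
        exact ⟨6*k-1, by omega, h1, h2, Or.inr ⟨by omega, by rw [h3]; omega⟩⟩
      · obtain ⟨h1, h2, h3⟩ := pair_to_div (6*kk-1) (6*k-1) (6*n+1) (by omega) hab (by rw [mul_comm]; exact h)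
        exact ⟨6*kk-1, by omega, h1, h2, Or.inr ⟨by omega, by rw [h3]; omega⟩⟩
  · rintro ⟨j, hj5, hjj, hmod, hres⟩
    obtain ⟨e, hm, hje, hdiv⟩ := div_to_pair _ j hj5 hjj hmod
    rw [hdiv] at hres
    have he5 : 5 ≤ e := le_trans hj5 hje
    have h5j : 5*j ≤ 6*n+1 := by nlinarith [mul_nonneg (by omega : (0:ℤ) ≤ j) (by omega : (0:ℤ) ≤ e - 5)]
    have h5e : 5*e ≤ 6*n+1 := by nlinarith [mul_nonneg (by omega : (0:ℤ) ≤ e) (by omega : (0:ℤ) ≤ j - 5)]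
    rcases hres with ⟨hj6, he6⟩ | ⟨hj6, he6⟩
    · obtain ⟨k, hk⟩ : ∃ k, j = 6*k+1 := ⟨j/6, by omega⟩
      obtain ⟨kk, hkk⟩ : ∃ kk, e = 6*kk+1 := ⟨e/6, by omega⟩
      exact ⟨k, ⟨by omega, by omega⟩, kk, ⟨by omega, by omega⟩,
        Or.inl (by rw [← hk, ← hkk]; exact hm.symm)⟩
    · obtain ⟨k, hk⟩ : ∃ k, j = 6*k-1 := ⟨(j+1)/6, by omega⟩
      obtain ⟨kk, hkk⟩ : ∃ kk, e = 6*kk-1 := ⟨(e+1)/6, by omega⟩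
      exact ⟨k, ⟨by omega, by omega⟩, kk, ⟨by omega, by omega⟩,
        Or.inr (by rw [← hk, ← hkk]; exact hm.symm)⟩

lemma key_minus (n : Int) :
    (∃ k, (1 ≤ k ∧ k < n) ∧ ∃ kk, (1 ≤ kk ∧ kk < n) ∧
      ((6*k-1)*(6*kk+1) = 6*n-1 ∨ (6*k+1)*(6*kk-1) = 6*n-1))
    ↔ (∃ j, 5 ≤ j ∧ j * j ≤ 6*n-1 ∧ (6*n-1) % j = 0 ∧
        ((j % 6 = 1 ∧ ((6*n-1)/j) % 6 = 5) ∨ (j % 6 = 5 ∧ ((6*n-1)/j) % 6 = 1))) := by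
  constructor
  · rintro ⟨k, ⟨hk1, hk2⟩, kk, ⟨hkk1, hkk2⟩, h | h⟩
    · rcases le_total (6*k-1) (6*kk+1) with hab | hab
      · obtain ⟨h1, h2, h3⟩ := pair_to_div _ _ _ (by omega) hab h
        exact ⟨6*k-1, by omega, h1, h2, Or.inr ⟨by omega, by rw [h3]; omega⟩⟩
      · obtain ⟨h1, h2, h3⟩ := pair_to_div (6*kk+1) (6*k-1) (6*n-1) (by omega) hab (by rw [mul_comm]; exact h)
        exact ⟨6*kk+1, by omega, h1, h2, Or.inl ⟨by omega, by rw [h3]; omega⟩⟩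
    · rcases le_total (6*k+1) (6*kk-1) with hab | hab
      · obtain ⟨h1, h2, h3⟩ := pair_to_div _ _ _ (by omega) hab h
        exact ⟨6*k+1, by omega, h1, h2, Or.inl ⟨by omega, by rw [h3]; omega⟩⟩
      · obtain ⟨h1, h2, h3⟩ := pair_to_div (6*kk-1) (6*k+1) (6*n-1) (by omega) hab (by rw [mul_comm]; exact h)
        exact ⟨6*kk-1, by omega, h1, h2, Or.inr ⟨by omega, by rw [h3]; omega⟩⟩
  · rintro ⟨j, hj5, hjj, hmod, hres⟩
    obtain ⟨e, hm, hje, hdiv⟩ := div_to_pair _ j hj5 hjj hmod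
    rw [hdiv] at hres
    have he5 : 5 ≤ e := le_trans hj5 hje
    have h5j : 5*j ≤ 6*n-1 := by nlinarith [mul_nonneg (by omega : (0:ℤ) ≤ j) (by omega : (0:ℤ) ≤ e - 5)]
    have h5e : 5*e ≤ 6*n-1 := by nlinarith [mul_nonneg (by omega : (0:ℤ) ≤ e) (by omega : (0:ℤ) ≤ j - 5)]
    rcases hres with ⟨hj6, he6⟩ | ⟨hj6, he6⟩
    · obtain ⟨k, hk⟩ : ∃ k, j = 6*k+1 := ⟨j/6, by omega⟩
      obtain ⟨kk, hkk⟩ : ∃ kk, e = 6*kk-1 := ⟨(e+1)/6, by omega⟩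
      exact ⟨k, ⟨by omega, by omega⟩, kk, ⟨by omega, by omega⟩,
        Or.inr (by rw [← hk, ← hkk]; exact hm.symm)⟩
    · obtain ⟨k, hk⟩ : ∃ k, j = 6*k-1 := ⟨(j+1)/6, by omega⟩
      obtain ⟨kk, hkk⟩ : ∃ kk, e = 6*kk+1 := ⟨e/6, by omega⟩
      exact ⟨k, ⟨by omega, by omega⟩, kk, ⟨by omega, by omega⟩,
        Or.inl (by rw [← hk, ← hkk]; exact hm.symm)⟩

-- converting the PySem mod/floordiv forms of the loop invariant into plain % and /
lemma trial_glue (m : Int) (plus : Bool) :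
    pvTrial m plus 5 = true ↔
      ∃ j, 5 ≤ j ∧ j * j ≤ m ∧ m % j = 0 ∧ pvOk plus (j % 6) ((m / j) % 6) = true := by
  rw [pvTrial_eq_true m plus 5 (by omega)]
  refine exists_congr fun j => ?_
  by_cases h5 : 5 ≤ j
  · rw [PySem.Int.mod_eq_emod_of_pos (by omega : (0:ℤ) < j),
      PySem.Int.floordiv_eq_ediv_of_pos (by omega : (0:ℤ) < j),
      PySem.Int.mod_eq_emod_of_pos (by norm_num : (0:ℤ) < 6),
      PySem.Int.mod_eq_emod_of_pos (by norm_num : (0:ℤ) < 6)]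
  · simp [h5]

-- A's nested any over range(1, n) as an existential
lemma a_any (n : Int) (p : Int → Int → Bool) :
    ((PySem.List.pyRange 1 n 1).any fun k => (PySem.List.pyRange 1 n 1).any fun kk => p k kk) = true
      ↔ ∃ k, (1 ≤ k ∧ k < n) ∧ ∃ kk, (1 ≤ kk ∧ kk < n) ∧ p k kk = true := by
  simp [List.any_eq_true, PySem.List.mem_pyRange_one, and_assoc]

-- ===== VERDICT (by name: the statement is the Claim_ definition above) =====
theorem is_semi_prime_spec : Claim_equal_is_semi_prime := by
  intro n pt _
  unfold Spec_is_semi_prime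
  rw [Bool.eq_iff_iff]
  by_cases hp : pt = "6n+1"
  · subst hp
    by_cases h2 : n < 2
    · have hnil : PySem.List.pyRange 1 n 1 = [] := PySem.List.pyRange_one_eq_nil (by omega)
      simp [is_semi_prime, is_semi_prime_alt, hnil, h2]
    · have hn : 2 ≤ n := by omega
      rw [show is_semi_prime n "6n+1" =
          ((PySem.List.pyRange 1 n 1).any fun k => (PySem.List.pyRange 1 n 1).any fun kk =>
            ((6*k+1)*(6*kk+1) == 6*n+1) || ((6*k-1)*(6*kk-1) == 6*n+1)) from by
          simp [is_semi_prime]]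
      rw [a_any, show is_semi_prime_alt n "6n+1" = pvTrial (6*n+1) true 5 from by
          simp [is_semi_prime_alt, h2]]
      rw [trial_glue]
      have := key_plus n
      simp only [Bool.or_eq_true, beq_iff_eq] at *
      rw [this]
      refine exists_congr fun j => ?_
      simp [pvOk]
  · by_cases hm : pt = "6n-1"
    · subst hm
      by_cases h2 : n < 2
      · have hnil : PySem.List.pyRange 1 n 1 = [] := PySem.List.pyRange_one_eq_nil (by omega)
        simp [is_semi_prime, is_semi_prime_alt, hnil, h2]
      · have hn : 2 ≤ n := by omega
        rw [show is_semi_prime n "6n-1" =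
            ((PySem.List.pyRange 1 n 1).any fun k => (PySem.List.pyRange 1 n 1).any fun kk =>
              ((6*k-1)*(6*kk+1) == 6*n-1) || ((6*k+1)*(6*kk-1) == 6*n-1)) from by
            simp [is_semi_prime]]
        rw [a_any, show is_semi_prime_alt n "6n-1" = pvTrial (6*n-1) false 5 from by
            simp [is_semi_prime_alt, h2]]
        rw [trial_glue]
        have := key_minus n
        simp only [Bool.or_eq_true, beq_iff_eq] at *
        rw [this]
        refine exists_congr fun j => ?_
        simp [pvOk]
    · simp [is_semi_prime, is_semi_prime_alt, hp, hm]
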